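-- pv_equiv track=rewrite | github.com/Varfolomeus/text2speech-local-4-linux | textToSpeechLocalSmart.py | merge_adjacent_tokens
-- ===== SOURCE A (Python) =====
-- def merge_adjacent_tokens(tokens):
--     if not tokens:
--         return []
--
--     merged = []
--     current_lang, current_text = tokens[0]
--
--     for lang, text in tokens[1:]:
--         if lang == current_lang:
--             current_text += text
--         else:
--             if current_text.strip():
--                 merged.append((current_lang, current_text))
--             current_lang = lang
--             current_text = text
--
--     if current_text.strip():
--         merged.append((current_lang, current_text))
--
--     return merged
-- ===== SOURCE B (Python) =====
-- def merge_adjacent_tokens(tokens):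
--     result = []
--     i = 0
--     n = len(tokens)
--     while i < n:
--         lang = tokens[i][0]
--         parts = []
--         j = i
--         while j < n and tokens[j][0] == lang:
--             parts.append(tokens[j][1])
--             j += 1
--         combined = ''.join(parts)
--         if combined.strip():
--             result.append((lang, combined))
--         i = j
--     return result
-- ===== Notes on version B (the rewrite author's own statement) =====
-- stated objective: alternative
-- what changed: Replaces A's single fold carrying (merged, current_lang, current_text) mutable state with a run-at-a-time two-pointer scan: each maximal run of one language is located, its texts joined at once, and the run emitted if its joined text strips non-empty.
import Mathlib
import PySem

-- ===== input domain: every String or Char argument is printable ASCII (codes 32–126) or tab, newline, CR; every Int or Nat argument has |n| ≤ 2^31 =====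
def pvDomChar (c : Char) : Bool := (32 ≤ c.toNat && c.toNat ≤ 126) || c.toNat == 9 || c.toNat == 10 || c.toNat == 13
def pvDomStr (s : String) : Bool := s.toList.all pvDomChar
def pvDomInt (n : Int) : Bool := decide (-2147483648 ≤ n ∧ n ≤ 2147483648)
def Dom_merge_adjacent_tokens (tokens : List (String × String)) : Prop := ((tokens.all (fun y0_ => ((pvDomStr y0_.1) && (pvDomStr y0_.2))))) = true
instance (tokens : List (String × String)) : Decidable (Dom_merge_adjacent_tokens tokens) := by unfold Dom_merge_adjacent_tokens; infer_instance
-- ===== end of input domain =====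

-- B re-implements A's stateful single fold as a run-at-a-time two-pointer scan (alternative decomposition, same cost).
-- ===== PORT A =====
-- the 'for lang, text in tokens[1:]' loop of A, carrying (merged, current_lang, current_text)
def mergeA_loop (merged : List (String × String)) (cl ct : String) :
    List (String × String) → List (String × String) × String × String
  | [] => (merged, cl, ct)
  | (l, t) :: rest =>
    if l == cl then
      mergeA_loop merged cl (ct ++ t) rest
    else
      mergeA_loop (merged ++ (if PySem.Str.strip ct ≠ "" then [(cl, ct)] else [])) l t rest

def merge_adjacent_tokens (tokens : List (String × String)) : List (String × String) :=
  match tokens with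
  | [] => []
  | (cl, ct) :: rest =>
    let r := mergeA_loop [] cl ct rest
    r.1 ++ (if PySem.Str.strip r.2.2 ≠ "" then [(r.2.1, r.2.2)] else [])

-- ===== PORT B =====
-- inner while loop of B: collect the texts of the leading run with language l, return (parts, remainder)
def mergeB_run (l : String) : List (String × String) → List String × List (String × String)
  | [] => ([], [])
  | (l', t) :: rest =>
    if l' == l then
      let r := mergeB_run l rest
      (t :: r.1, r.2)
    else ([], (l', t) :: rest)

theorem mergeB_run_rest_le (l : String) (xs : List (String × String)) :
    (mergeB_run l xs).2.length ≤ xs.length := by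
  induction xs with
  | nil => simp [mergeB_run]
  | cons x rest ih =>
    obtain ⟨l', t⟩ := x
    simp only [mergeB_run]
    split
    · exact Nat.le_succ_of_le ih
    · simp

-- outer while loop of B: one iteration per run
def merge_adjacent_tokens_alt (tokens : List (String × String)) : List (String × String) :=
  match tokens with
  | [] => []
  | (l, t) :: rest =>
    let r := mergeB_run l rest
    let combined := String.join (t :: r.1)
    (if PySem.Str.strip combined ≠ "" then [(l, combined)] else []) ++
      merge_adjacent_tokens_alt r.2
termination_by tokens.length
decreasing_by
  simpa using Nat.lt_succ_of_le (mergeB_run_rest_le l rest)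

-- ===== PRECONDITION & SPEC =====
def Spec_merge_adjacent_tokens (tokens : List (String × String)) (out : List (String × String)) : Prop := out = merge_adjacent_tokens_alt tokens
instance (tokens : List (String × String)) (out : List (String × String)) : Decidable (Spec_merge_adjacent_tokens tokens out) := by unfold Spec_merge_adjacent_tokens; infer_instance

-- ===== CLAIM (what is proved, stated in full; the proofs are below) =====
def Claim_equal_merge_adjacent_tokens : Prop := ∀ (tokens : List (String × String)), Dom_merge_adjacent_tokens tokens → Spec_merge_adjacent_tokens tokens (merge_adjacent_tokens tokens)

-- ===== LEMMAS AND PROOFS =====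
theorem strfold_append (l : List String) :
    ∀ a b : String, List.foldl (· ++ ·) (a ++ b) l = a ++ List.foldl (· ++ ·) b l := by
  induction l with
  | nil => intro a b; simp
  | cons c t ih => intro a b; simp only [List.foldl, String.append_assoc]; exact ih a (b ++ c)

theorem join_cons (s : String) (l : List String) :
    String.join (s :: l) = s ++ String.join l := by
  have h := strfold_append l s ""
  simp only [String.append_empty] at h
  simp [String.join, h]

-- the body of one outer iteration of B, restarted at state (cl, ct, rest)
def altOn (cl ct : String) (rest : List (String × String)) : List (String × String) :=
  let r := mergeB_run cl rest
  let combined := String.join (ct :: r.1)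
  (if PySem.Str.strip combined ≠ "" then [(cl, combined)] else []) ++
    merge_adjacent_tokens_alt r.2

theorem alt_cons (cl ct : String) (rest : List (String × String)) :
    merge_adjacent_tokens_alt ((cl, ct) :: rest) = altOn cl ct rest := by
  rw [merge_adjacent_tokens_alt, altOn]

theorem altOn_same (cl ct l t : String) (rs : List (String × String)) (h : l = cl) :
    altOn cl ct ((l, t) :: rs) = altOn cl (ct ++ t) rs := by
  simp only [altOn, mergeB_run, h, beq_self_eq_true, ite_true, join_cons, String.append_assoc]

theorem altOn_diff (cl ct l t : String) (rs : List (String × String)) (h : ¬ l = cl) :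
    altOn cl ct ((l, t) :: rs) =
      (if PySem.Str.strip ct ≠ "" then [(cl, ct)] else []) ++ altOn l t rs := by
  have hb : (l == cl) = false := by simp [h]
  simp only [altOn, mergeB_run, hb, Bool.false_eq_true, ite_false]
  rw [alt_cons]
  simp [altOn, String.join]

-- key invariant: flushing the loop state of A equals the prefix built so far plus B restarted there
theorem loop_eq_alt (rest : List (String × String)) :
    ∀ (m : List (String × String)) (cl ct : String),
    (mergeA_loop m cl ct rest).1 ++
      (if PySem.Str.strip (mergeA_loop m cl ct rest).2.2 ≠ "" then
        [((mergeA_loop m cl ct rest).2.1, (mergeA_loop m cl ct rest).2.2)] else []) =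
      m ++ altOn cl ct rest := by
  induction rest with
  | nil =>
    intro m cl ct
    simp [mergeA_loop, altOn, mergeB_run, String.join,
      show merge_adjacent_tokens_alt ([] : List (String × String)) = [] from by
        rw [merge_adjacent_tokens_alt]]
  | cons x rest ih =>
    intro m cl ct
    obtain ⟨l, t⟩ := x
    by_cases h : l = cl
    · have hb : (l == cl) = true := by simp [h]
      rw [altOn_same cl ct l t rest h]
      simpa only [mergeA_loop, hb, ite_true] using ih m cl (ct ++ t)
    · have hb : (l == cl) = false := by simp [h]
      rw [altOn_diff cl ct l t rest h, ← List.append_assoc]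
      simpa only [mergeA_loop, hb, Bool.false_eq_true, ite_false] using
        ih (m ++ (if PySem.Str.strip ct ≠ "" then [(cl, ct)] else [])) l t

-- ===== VERDICT (by name: the statement is the Claim_ definition above) =====
theorem merge_adjacent_tokens_spec : Claim_equal_merge_adjacent_tokens := by
  intro tokens _
  unfold Spec_merge_adjacent_tokens
  match tokens with
  | [] => rw [merge_adjacent_tokens_alt]; rfl
  | (cl, ct) :: rest =>
    rw [alt_cons]
    simpa [merge_adjacent_tokens] using loop_eq_alt rest [] cl ct
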